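-- pv_equiv track=rewrite | github.com/masakiaota/kyoupuro | practice/brown_diff/code_festival_final_c/code_festival_final_c.py | f
-- ===== SOURCE A (Python) =====
-- def f(N, A):
--     for i, Ni in enumerate(reversed(str(N))):
--         if (int(Ni) != A % N) or A == 0:
--             return False
--         A //= N
--     if A > 0:
--         return False
--     # Niを使い切るのとAが同時に0にならなければいけない
--     return True
-- ===== SOURCE B (Python) =====
-- def f(N, A):
--     if N < 2:
--         return False
--     digits = []
--     x = A
--     while x > 0:
--         digits.append(x % N)
--         x //= N
--     return digits == [int(c) for c in str(N)][::-1]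
-- ===== Notes on version B (the rewrite author's own statement) =====
-- stated objective: alternative
-- what changed: B replaces A's streaming digit-by-digit comparison (mutating A with A%N and A//=N while scanning reversed(str(N))) by a build-then-compare decomposition: it first extracts A's complete base-N digit list with a while x>0 loop on a local copy, then compares that list for equality with [int(c) for c in str(N)][::-1]; bases below 2, which have no positional representation, are rejected up front.
-- intended difference: For N >= 10 and negative A congruent to the base-N value of str(N)'s digits modulo N^len(str(N)) (e.g. N=10, A=-90), A returns True although a negative number has no such digit representation; B returns False, the intended answer. — e.g. on f(10, -90): A returns true, B returns false
import Mathlib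
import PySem

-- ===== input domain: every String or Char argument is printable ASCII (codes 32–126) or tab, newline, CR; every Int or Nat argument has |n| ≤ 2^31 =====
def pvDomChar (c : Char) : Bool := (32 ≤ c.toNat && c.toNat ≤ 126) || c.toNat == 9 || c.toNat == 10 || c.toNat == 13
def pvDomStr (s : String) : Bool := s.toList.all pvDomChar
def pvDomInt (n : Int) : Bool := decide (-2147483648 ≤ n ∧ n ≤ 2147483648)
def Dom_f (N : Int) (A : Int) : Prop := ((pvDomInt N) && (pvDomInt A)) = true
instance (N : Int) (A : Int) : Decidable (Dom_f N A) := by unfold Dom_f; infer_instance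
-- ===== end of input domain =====

-- B replaces A's streaming digit-by-digit comparison (which mutates A while scanning
-- reversed(str(N))) by a build-then-compare decomposition: extract A's full base-N digit
-- list, then compare it with [int(c) for c in str(N)][::-1]; bases < 2 rejected up front.

-- ===== PORT A =====
-- A's loop over reversed(str(N)) with running value a (Python's variable A); the `none`
-- branch is Python int()'s ValueError, unreachable on the inputs admitted by Pre_f
def fGo (N : Int) : List Char → Int → Bool
  | [], a => if a > 0 then false else true
  | c :: cs, a =>
    match PySem.Int.ofStr? (String.ofList [c]) with
    | none => false
    | some d =>
      if d ≠ PySem.Int.mod a N ∨ a = 0 then false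
      else fGo N cs (PySem.Int.floordiv a N)

def f (N : Int) (A : Int) : Bool := fGo N (PySem.Int.toChars N).reverse A

-- ===== PORT B =====
-- B's while x>0 loop building A's base-N digits, least significant first (fuelled;
-- x.toNat iterations always suffice since x strictly decreases while positive)
def fAltLoopF (N : Int) : Nat → Int → List Int
  | 0, _ => []
  | fuel + 1, x =>
    if 0 < x then PySem.Int.mod x N :: fAltLoopF N fuel (PySem.Int.floordiv x N) else []

-- int(c) for one char of str(N); under B's N ≥ 2 guard c is always a decimal digit,
-- so int()'s ValueError branch (none, defaulted to 0 here) is unreachable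
def intChar (c : Char) : Int := (PySem.Int.ofStr? (String.ofList [c])).getD 0

def f_alt (N : Int) (A : Int) : Bool :=
  if N < 2 then false
  else fAltLoopF N A.toNat A == ((PySem.Int.toChars N).map intChar).reverse

-- ===== PRECONDITION & SPEC =====
-- Pre_f excludes only N = 0, where the Python A raises ZeroDivisionError (A % 0) for every A.
def Pre_f (N : Int) (A : Int) : Prop := N ≠ 0
instance (N : Int) (A : Int) : Decidable (Pre_f N A) := by unfold Pre_f; infer_instance
def pvWitness_f : Int × Int := (10, 10)

-- decimal digits of n, least significant first (fuelled, kernel-computable; equals Nat.digits 10)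
def digits10F : Nat → Nat → List Nat
  | 0, _ => []
  | fuel + 1, n => if n = 0 then [] else n % 10 :: digits10F fuel (n / 10)

def digits10 (n : Nat) : List Nat := digits10F n n

-- value of a least-significant-first digit list in base N (helper for D_f and the proofs)
def vLSB (N : Int) : List Nat → Int
  | [] => 0
  | d :: ds => (d : Int) + N * vLSB N ds

-- For N ≥ 10 and negative A congruent to the base-N value of str(N)'s digits modulo
-- N^len(str(N)) (e.g. N=10, A=-90), A returns True although a negative number has no base-N
-- digit representation; B returns False, the intended answer.
def D_f (N : Int) (A : Int) : Prop :=
  10 ≤ N ∧ A < 0 ∧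
    PySem.Int.mod A (N ^ (digits10 N.toNat).length) = vLSB N (digits10 N.toNat)
instance (N : Int) (A : Int) : Decidable (D_f N A) := by unfold D_f; infer_instance

def Spec_f (N : Int) (A : Int) (out : Bool) : Prop := ¬ D_f N A → out = f_alt N A
instance (N : Int) (A : Int) (out : Bool) : Decidable (Spec_f N A out) := by unfold Spec_f; infer_instance

def pvDiffWitness_f : Int × Int := (10, -90)
def pvDiffWitnessOut_f : Bool × Bool := (true, false)

-- ===== CLAIM (what is proved, stated in full; the proofs are below) =====
def Claim_unchanged_f : Prop := ∀ (N : Int) (A : Int), Dom_f N A → Pre_f N A → Spec_f N A (f N A)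
def Claim_changed_f : Prop := Dom_f (pvDiffWitness_f.1) (pvDiffWitness_f.2) ∧ Pre_f (pvDiffWitness_f.1) (pvDiffWitness_f.2) ∧ D_f (pvDiffWitness_f.1) (pvDiffWitness_f.2) ∧ f (pvDiffWitness_f.1) (pvDiffWitness_f.2) = pvDiffWitnessOut_f.1 ∧ f_alt (pvDiffWitness_f.1) (pvDiffWitness_f.2) = pvDiffWitnessOut_f.2 ∧ pvDiffWitnessOut_f.1 ≠ pvDiffWitnessOut_f.2
def Claim_exact_f : Prop := ∀ (N : Int) (A : Int), Dom_f N A → Pre_f N A → D_f N A → f N A ≠ f_alt N A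

-- ===== LEMMAS AND PROOFS =====

-- digit lists as Int lists (the element type B's loop produces)
def castList : List Nat → List Int
  | [] => []
  | d :: ds => (d : Int) :: castList ds

theorem pymod_eq_emod (a N : Int) (h : 0 ≤ N) : PySem.Int.mod a N = a % N := by
  simp [PySem.Int.mod, Int.fmod_eq_emod, Or.inl h]

theorem pydiv_eq_ediv (a N : Int) (h : 0 ≤ N) : PySem.Int.floordiv a N = a / N := by
  simp [PySem.Int.floordiv, Int.fdiv_eq_ediv, Or.inl h]

theorem digits10F_eq (fuel : Nat) :
    ∀ n : Nat, n ≤ fuel → digits10F fuel n = Nat.digits 10 n := by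
  induction fuel with
  | zero => intro n hn; interval_cases n; rfl
  | succ fuel ih =>
    intro n hn
    by_cases h0 : n = 0
    · simp [digits10F, h0]
    · rw [digits10F, if_neg h0, ih (n / 10) (by omega),
        ← Nat.digits_def' (by norm_num : (1:Nat) < 10) (by omega)]

theorem digits10_eq (n : Nat) : digits10 n = Nat.digits 10 n := digits10F_eq n n le_rfl

theorem ofStr_digitChar {d : Nat} (hd : d < 10) :
    PySem.Int.ofStr? (String.ofList [Nat.digitChar d]) = some (d : Int) := by
  interval_cases d <;> decide

theorem ofStr_dash : PySem.Int.ofStr? (String.ofList ['-']) = none := by decide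

theorem getLast?_cons_of_ne_nil {α : Type} {d : α} {ds : List α} (h : ds ≠ []) :
    (d :: ds).getLast? = ds.getLast? := by
  cases ds with
  | nil => exact absurd rfl h
  | cons e es => exact List.getLast?_cons_cons

-- Nat.toDigits agrees with Nat.digits (reversed and rendered) on positive numbers
theorem toDigitsCore_eq_digits (fuel : Nat) :
    ∀ (n : Nat) (acc : List Char), 0 < n → n < fuel →
      Nat.toDigitsCore 10 fuel n acc = ((Nat.digits 10 n).map Nat.digitChar).reverse ++ acc := by
  induction fuel with
  | zero => intro n acc h1 h2; omega
  | succ fuel ih =>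
    intro n acc h1 h2
    rw [Nat.toDigitsCore]
    have hd : Nat.digits 10 n = n % 10 :: Nat.digits 10 (n / 10) :=
      Nat.digits_def' (by norm_num) h1
    by_cases h10 : n / 10 = 0
    · simp [h10, hd]
    · have hlt : n / 10 < n := Nat.div_lt_self h1 (by norm_num)
      rw [if_neg h10, ih (n / 10) _ (Nat.pos_of_ne_zero h10) (by omega), hd]
      simp

theorem toChars_reverse_pos {N : Int} (h : 1 ≤ N) :
    (PySem.Int.toChars N).reverse = (Nat.digits 10 N.toNat).map Nat.digitChar := by
  have h0 : ¬ N < 0 := by omega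
  have h1 : 0 < N.toNat := by omega
  rw [PySem.Int.toChars, if_neg h0, Nat.toDigits,
    toDigitsCore_eq_digits _ _ _ h1 (by omega)]
  simp

theorem toChars_reverse_neg {N : Int} (h : N < 0) :
    (PySem.Int.toChars N).reverse = (Nat.toDigits 10 N.natAbs).reverse ++ ['-'] := by
  rw [PySem.Int.toChars, if_pos h]
  simp

-- A's loop returns False whenever the char list ends with '-' (i.e. for every negative N)
theorem fGo_dash (N : Int) : ∀ (L : List Char) (a : Int), fGo N (L ++ ['-']) a = false := by
  intro L
  induction L with
  | nil => intro a; simp only [List.nil_append, fGo, ofStr_dash]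
  | cons c cs ih =>
    intro a
    simp only [List.cons_append, fGo]
    cases hc : PySem.Int.ofStr? (String.ofList [c]) with
    | none => rfl
    | some d =>
      by_cases hcond : d ≠ PySem.Int.mod a N ∨ a = 0
      · simp [hcond]
      · simp only [if_neg hcond]
        exact ih _

theorem vLSB_pos {N : Int} (h : 1 ≤ N) :
    ∀ L, (∀ x, L.getLast? = some x → x ≠ 0) → L ≠ [] → 1 ≤ vLSB N L := by
  intro L
  induction L with
  | nil => intro _ hne; exact absurd rfl hne
  | cons d ds ih =>
    intro hlast _
    by_cases hds : ds = []
    · subst hds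
      have hd : d ≠ 0 := hlast d rfl
      have h1 : (1 : Int) ≤ (d : Int) := by exact_mod_cast Nat.one_le_iff_ne_zero.mpr hd
      simp only [vLSB]
      omega
    · have h1 : 1 ≤ vLSB N ds := by
        apply ih _ hds
        intro x hx
        exact hlast x (by rwa [getLast?_cons_of_ne_nil hds])
      have h2 : (0 : Int) ≤ (d : Int) := Int.natCast_nonneg d
      simp only [vLSB]
      nlinarith

-- key divmod identity: a mod N^(k+1) splits into (a div N) mod N^k and a mod N
theorem emod_pow_succ {N : Int} (h : 1 ≤ N) (a : Int) (k : Nat) :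
    a % N ^ (k + 1) = N * (a / N % N ^ k) + a % N := by
  have hN : 0 < N := by omega
  have hk : (0 : Int) < N ^ k := pow_pos (by omega) _
  have e1 : N * (a / N) + a % N = a := Int.ediv_add_emod a N
  have e2 : N ^ k * (a / N / N ^ k) + a / N % N ^ k = a / N := Int.ediv_add_emod (a / N) (N ^ k)
  have hr1 : 0 ≤ a % N := Int.emod_nonneg a (by omega)
  have hr1' : a % N < N := Int.emod_lt_of_pos a hN
  have hr2 : 0 ≤ a / N % N ^ k := Int.emod_nonneg _ (by omega)
  have hr2' : a / N % N ^ k < N ^ k := Int.emod_lt_of_pos _ hk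
  have key : a = (N * (a / N % N ^ k) + a % N) + N ^ (k + 1) * (a / N / N ^ k) := by
    rw [pow_succ]
    nlinarith [e1, e2]
  calc a % N ^ (k + 1)
      = ((N * (a / N % N ^ k) + a % N) + N ^ (k + 1) * (a / N / N ^ k)) % N ^ (k + 1) := by
        rw [← key]
    _ = (N * (a / N % N ^ k) + a % N) % N ^ (k + 1) := by
        rw [Int.add_mul_emod_self_left]
    _ = N * (a / N % N ^ k) + a % N := by
        apply Int.emod_eq_of_lt (by nlinarith)
        rw [pow_succ]
        nlinarith

-- A's loop on a rendered digit list (LSB first), nonnegative running value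
theorem fGo_nonneg {N : Int} (hN : 1 ≤ N) :
    ∀ (L : List Nat) (a : Int), 0 ≤ a → (∀ d ∈ L, d < 10) →
      (∀ x, L.getLast? = some x → x ≠ 0) →
      fGo N (L.map Nat.digitChar) a =
        decide (a = vLSB N L ∧ ∀ d ∈ L, (d : Int) < N) := by
  intro L
  induction L with
  | nil =>
    intro a ha _ _
    simp only [List.map_nil, fGo, vLSB]
    by_cases h0 : a = 0
    · simp [h0]
    · simp [show a > 0 by omega, h0]
  | cons d ds ih =>
    intro a ha hd10 hlast
    have hd : d < 10 := hd10 d List.mem_cons_self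
    simp only [List.map_cons]
    simp only [fGo, ofStr_digitChar hd]
    have hmod : PySem.Int.mod a N = a % N := pymod_eq_emod a N (by omega)
    have hdiv : PySem.Int.floordiv a N = a / N := pydiv_eq_ediv a N (by omega)
    have hmlt : a % N < N := Int.emod_lt_of_pos a (by omega)
    have hmge : 0 ≤ a % N := Int.emod_nonneg a (by omega)
    have hsplit : N * (a / N) + a % N = a := Int.ediv_add_emod a N
    by_cases h0 : a = 0
    · rw [if_pos (Or.inr h0), eq_comm, decide_eq_false_iff_not]
      rintro ⟨heq, hval⟩
      have h1 : 1 ≤ vLSB N (d :: ds) := vLSB_pos hN _ hlast (by simp)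
      omega
    · by_cases hde : (d : Int) = a % N
      · have hcond : ¬ ((d : Int) ≠ PySem.Int.mod a N ∨ a = 0) := by
          rw [hmod]; push_neg; exact ⟨hde, h0⟩
        rw [if_neg hcond, hdiv]
        have ha' : 0 ≤ a / N := Int.ediv_nonneg ha (by omega)
        rw [ih (a / N) ha' (fun x hx => hd10 x (List.mem_cons.mpr (Or.inr hx)))
          (fun x hx => hlast x (by
            by_cases hds : ds = []
            · subst hds; simp at hx
            · rwa [getLast?_cons_of_ne_nil hds]))]
        rw [decide_eq_decide]
        constructor
        · rintro ⟨heq, hval⟩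
          refine ⟨by simp only [vLSB]; rw [← heq]; linarith [hsplit, hde], fun x hx => ?_⟩
          rcases List.mem_cons.mp hx with h | h
          · subst h; omega
          · exact hval x h
        · rintro ⟨heq, hval⟩
          simp only [vLSB] at heq
          have hc : N * (a / N) = N * vLSB N ds := by linarith [hsplit, hde]
          exact ⟨mul_left_cancel₀ (by omega : (N : Int) ≠ 0) hc,
            fun x hx => hval x (List.mem_cons.mpr (Or.inr hx))⟩
      · rw [if_pos (Or.inl (by rw [hmod]; exact hde)), eq_comm, decide_eq_false_iff_not]
        rintro ⟨heq, hval⟩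
        have hdlt : (d : Int) < N := hval d List.mem_cons_self
        have hdge : (0 : Int) ≤ (d : Int) := Int.natCast_nonneg d
        simp only [vLSB] at heq
        have hmm : a % N = (d : Int) := by
          rw [heq, Int.add_mul_emod_self_left (d : Int) N (vLSB N ds),
            Int.emod_eq_of_lt hdge hdlt]
        exact hde hmm.symm

-- A's loop on a rendered digit list (LSB first), negative running value
theorem fGo_neg {N : Int} (hN : 1 ≤ N) :
    ∀ (L : List Nat) (a : Int), a < 0 → (∀ d ∈ L, d < 10) →
      fGo N (L.map Nat.digitChar) a =
        decide (a % N ^ L.length = vLSB N L ∧ ∀ d ∈ L, (d : Int) < N) := by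
  intro L
  induction L with
  | nil =>
    intro a ha _
    simp [fGo, vLSB, show ¬ a > 0 by omega]
  | cons d ds ih =>
    intro a ha hd10
    have hd : d < 10 := hd10 d List.mem_cons_self
    simp only [List.map_cons]
    simp only [fGo, ofStr_digitChar hd]
    have hmod : PySem.Int.mod a N = a % N := pymod_eq_emod a N (by omega)
    have hdiv : PySem.Int.floordiv a N = a / N := pydiv_eq_ediv a N (by omega)
    have h0 : a ≠ 0 := by omega
    have hmlt : a % N < N := Int.emod_lt_of_pos a (by omega)
    have hmge : 0 ≤ a % N := Int.emod_nonneg a (by omega)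
    have hkey := emod_pow_succ hN a ds.length
    by_cases hde : (d : Int) = a % N
    · have hcond : ¬ ((d : Int) ≠ PySem.Int.mod a N ∨ a = 0) := by
        rw [hmod]; push_neg; exact ⟨hde, h0⟩
      rw [if_neg hcond, hdiv]
      have ha' : a / N < 0 := Int.ediv_neg_of_neg_of_pos ha (by omega)
      rw [ih (a / N) ha' (fun x hx => hd10 x (List.mem_cons.mpr (Or.inr hx)))]
      rw [decide_eq_decide]
      constructor
      · rintro ⟨heq, hval⟩
        refine ⟨?_, fun x hx => ?_⟩
        · simp only [List.length_cons, vLSB]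
          rw [hkey, heq]; linarith [hde]
        · rcases List.mem_cons.mp hx with h | h
          · subst h; omega
          · exact hval x h
      · rintro ⟨heq, hval⟩
        simp only [List.length_cons, vLSB] at heq
        rw [hkey] at heq
        have hc : N * (a / N % N ^ ds.length) = N * vLSB N ds := by linarith [hde]
        exact ⟨mul_left_cancel₀ (by omega : (N : Int) ≠ 0) hc,
          fun x hx => hval x (List.mem_cons.mpr (Or.inr hx))⟩
    · rw [if_pos (Or.inl (by rw [hmod]; exact hde)), eq_comm, decide_eq_false_iff_not]
      rintro ⟨heq, hval⟩
      have hdlt : (d : Int) < N := hval d List.mem_cons_self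
      have hdge : (0 : Int) ≤ (d : Int) := Int.natCast_nonneg d
      simp only [List.length_cons, vLSB] at heq
      have hL : a % N ^ (ds.length + 1) % N = a % N :=
        Int.emod_emod_of_dvd a (dvd_pow_self N (Nat.succ_ne_zero _))
      have hR : ((d : Int) + N * vLSB N ds) % N = (d : Int) := by
        rw [Int.add_mul_emod_self_left (d : Int) N (vLSB N ds), Int.emod_eq_of_lt hdge hdlt]
      have hmm : a % N = (d : Int) := by rw [← hL, heq, hR]
      exact hde hmm.symm

-- B's digit-extraction loop on nonpositive input yields [] for any fuel
theorem fAltLoopF_nonpos {N : Int} (a : Int) (ha : a ≤ 0) :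
    ∀ fuel, fAltLoopF N fuel a = [] := by
  intro fuel
  cases fuel with
  | zero => rfl
  | succ g => rw [fAltLoopF, if_neg (by omega)]

-- characterisation of B's digit-extraction loop against a candidate digit list
theorem fAltLoopF_char {N : Int} (hN : 2 ≤ N) :
    ∀ (T : List Nat) (a : Int) (fuel : Nat), 0 ≤ a → a.toNat ≤ fuel →
      (∀ x, T.getLast? = some x → x ≠ 0) →
      ((fAltLoopF N fuel a = castList T) ↔
        (a = vLSB N T ∧ ∀ d ∈ T, (d : Int) < N)) := by
  intro T
  induction T with
  | nil =>
    intro a fuel ha hfuel _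
    simp only [castList, List.map_nil, vLSB]
    constructor
    · intro h
      refine ⟨?_, by simp⟩
      by_contra hne
      have hpos : 0 < a := by omega
      cases fuel with
      | zero => omega
      | succ g =>
        rw [fAltLoopF, if_pos hpos] at h
        exact absurd h (by simp [castList])
    · rintro ⟨rfl, -⟩
      exact fAltLoopF_nonpos 0 le_rfl fuel
  | cons d ds ih =>
    intro a fuel ha hfuel hlast
    have hdge : (0 : Int) ≤ (d : Int) := Int.natCast_nonneg d
    by_cases h0 : a = 0
    · subst h0
      rw [fAltLoopF_nonpos 0 le_rfl fuel]
      constructor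
      · intro h; exact absurd h (by simp [castList])
      · rintro ⟨heq, -⟩
        have h1 : 1 ≤ vLSB N (d :: ds) := vLSB_pos (by omega) _ hlast (by simp)
        omega
    · have hpos : 0 < a := by omega
      obtain ⟨g, rfl⟩ : ∃ g, fuel = g + 1 := ⟨fuel - 1, by omega⟩
      rw [fAltLoopF, if_pos hpos, pymod_eq_emod a N (by omega), pydiv_eq_ediv a N (by omega)]
      have hmlt : a % N < N := Int.emod_lt_of_pos a (by omega)
      have hmge : 0 ≤ a % N := Int.emod_nonneg a (by omega)
      have hsplit : N * (a / N) + a % N = a := Int.ediv_add_emod a N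
      have ha' : 0 ≤ a / N := Int.ediv_nonneg ha (by omega)
      have hdivlt : a / N < a := by nlinarith [hsplit, ha', hmge]
      have hih := ih (a / N) g ha' (by omega)
        (fun x hx => hlast x (by
          by_cases hds : ds = []
          · subst hds; simp at hx
          · rwa [getLast?_cons_of_ne_nil hds]))
      by_cases hde : a % N = (d : Int)
      · simp only [castList, List.cons.injEq, hde, true_and]
        rw [hih]
        constructor
        · rintro ⟨heq, hval⟩
          refine ⟨by simp only [vLSB]; rw [← heq]; linarith [hsplit, hde], fun x hx => ?_⟩
          rcases List.mem_cons.mp hx with h | h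
          · subst h; omega
          · exact hval x h
        · rintro ⟨heq, hval⟩
          simp only [vLSB] at heq
          have hc : N * (a / N) = N * vLSB N ds := by linarith [hsplit, hde]
          exact ⟨mul_left_cancel₀ (by omega : (N : Int) ≠ 0) hc,
            fun x hx => hval x (List.mem_cons.mpr (Or.inr hx))⟩
      · simp only [castList, List.cons.injEq]
        constructor
        · rintro ⟨h, -⟩; exact absurd h hde
        · rintro ⟨heq, hval⟩
          have hdlt : (d : Int) < N := hval d List.mem_cons_self
          simp only [vLSB] at heq
          have hmm : a % N = (d : Int) := by
            rw [heq, Int.add_mul_emod_self_left (d : Int) N (vLSB N ds),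
              Int.emod_eq_of_lt hdge hdlt]
          exact absurd hmm hde
        
-- digits of N.toNat: the facts the characterisations need
theorem digits_facts {N : Int} (hN : 1 ≤ N) :
    (∀ d ∈ Nat.digits 10 N.toNat, d < 10) ∧
      (∀ x, (Nat.digits 10 N.toNat).getLast? = some x → x ≠ 0) ∧
      Nat.digits 10 N.toNat ≠ [] := by
  have hne : N.toNat ≠ 0 := by omega
  have hnil : Nat.digits 10 N.toNat ≠ [] := Nat.digits_ne_nil_iff_ne_zero.mpr hne
  refine ⟨fun d hd => Nat.digits_lt_base (by norm_num) hd, ?_, hnil⟩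
  intro x hx
  rw [List.getLast?_eq_getLast hnil] at hx
  have hlast := Nat.getLast_digit_ne_zero 10 hne
  exact Option.some_inj.mp hx ▸ hlast

theorem intChar_digitChar {d : Nat} (hd : d < 10) :
    intChar (Nat.digitChar d) = (d : Int) := by
  rw [intChar, ofStr_digitChar hd]
  rfl

-- rendering digits to chars and reading them back with int() is castList
theorem map_intChar_digitChar : ∀ (L : List Nat), (∀ d ∈ L, d < 10) →
    L.map (intChar ∘ Nat.digitChar) = castList L := by
  intro L
  induction L with
  | nil => intro _; rfl
  | cons d ds ih =>
    intro h10
    simp only [List.map_cons, castList, Function.comp_apply]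
    exact congrArg₂ _ (intChar_digitChar (h10 d List.mem_cons_self))
      (ih (fun x hx => h10 x (List.mem_cons.mpr (Or.inr hx))))

-- B's comparison target [int(c) for c in str(N)][::-1] = decimal digits of N, LSB first
theorem target_eq {N : Int} (hN : 1 ≤ N) :
    ((PySem.Int.toChars N).map intChar).reverse =
      castList (Nat.digits 10 N.toNat) := by
  obtain ⟨h10, -, -⟩ := digits_facts hN
  rw [← List.map_reverse, toChars_reverse_pos hN, List.map_map]
  exact map_intChar_digitChar _ h10

-- characterisation of A for N ≥ 1, A ≥ 0
theorem f_char_nonneg {N A : Int} (hN : 1 ≤ N) (hA : 0 ≤ A) :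
    f N A = decide (A = vLSB N (Nat.digits 10 N.toNat) ∧
      ∀ d ∈ Nat.digits 10 N.toNat, (d : Int) < N) := by
  obtain ⟨h10, hlast, _⟩ := digits_facts hN
  rw [f, toChars_reverse_pos hN, fGo_nonneg hN _ A hA h10 hlast]

-- characterisation of A for N ≥ 1, A < 0
theorem f_char_neg {N A : Int} (hN : 1 ≤ N) (hA : A < 0) :
    f N A = decide (A % N ^ (Nat.digits 10 N.toNat).length = vLSB N (Nat.digits 10 N.toNat) ∧
      ∀ d ∈ Nat.digits 10 N.toNat, (d : Int) < N) := by
  obtain ⟨h10, _, _⟩ := digits_facts hN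
  rw [f, toChars_reverse_pos hN, fGo_neg hN _ A hA h10]

-- A returns False for every negative base
theorem f_neg_base {N : Int} (A : Int) (hN : N < 0) : f N A = false := by
  rw [f, toChars_reverse_neg hN, fGo_dash]

-- characterisation of B for N ≥ 2, A ≥ 1
theorem f_alt_char {N A : Int} (hN : 2 ≤ N) (hA : 1 ≤ A) :
    f_alt N A = decide (A = vLSB N (Nat.digits 10 N.toNat) ∧
      ∀ d ∈ Nat.digits 10 N.toNat, (d : Int) < N) := by
  obtain ⟨-, hlast, -⟩ := digits_facts (show (1:Int) ≤ N by omega)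
  rw [f_alt, if_neg (by omega), target_eq (show (1:Int) ≤ N by omega)]
  have hchar := fAltLoopF_char hN (Nat.digits 10 N.toNat) A A.toNat (by omega) le_rfl hlast
  rw [Bool.eq_iff_iff]
  simp only [beq_iff_eq, decide_eq_true_eq]
  exact hchar

-- B returns False for N ≥ 2 and A ≤ 0: the extracted digit list is empty, the target is not
theorem f_alt_nonpos {N A : Int} (hN : 2 ≤ N) (hA : A ≤ 0) : f_alt N A = false := by
  obtain ⟨-, -, hnil⟩ := digits_facts (show (1:Int) ≤ N by omega)
  rw [f_alt, if_neg (by omega), target_eq (by omega), fAltLoopF_nonpos A hA]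
  rw [beq_eq_false_iff_ne]
  intro h
  cases hd : Nat.digits 10 N.toNat with
  | nil => exact hnil hd
  | cons x xs => rw [hd] at h; exact absurd h.symm (by simp [castList])

-- digits of a one-digit base
theorem digits_small {N : Int} (h1 : 1 ≤ N) (h9 : N ≤ 9) :
    Nat.digits 10 N.toNat = [N.toNat] := by
  rw [Nat.digits_def' (by norm_num : (1:Nat) < 10) (by omega)]
  rw [Nat.mod_eq_of_lt (by omega), Nat.div_eq_of_lt (by omega)]
  simp

-- ===== VERDICT (by name: the statement is the Claim_ definition above) =====
theorem f_spec : Claim_unchanged_f := by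
  intro N A _ hpre hnd
  rcases lt_trichotomy N 0 with hneg | h0 | hpos
  · rw [f_neg_base A hneg, f_alt, if_pos (by omega)]
  · exact absurd h0 hpre
  · by_cases hN2 : N < 2
    · -- N = 1: both sides are False (the digit '1' is never < the base 1)
      have hN1 : N = 1 := by omega
      subst hN1
      rw [f_alt, if_pos (by norm_num)]
      have hds := digits_small le_rfl (by norm_num)
      rcases lt_or_ge A 0 with hA | hA
      · rw [f_char_neg le_rfl hA, decide_eq_false_iff_not]
        rintro ⟨-, hval⟩
        have h1 : ((1:Int).toNat : Int) < 1 := hval (1:Int).toNat (by rw [hds]; exact List.mem_cons_self)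
        simp at h1
      · rw [f_char_nonneg le_rfl hA, decide_eq_false_iff_not]
        rintro ⟨-, hval⟩
        have h1 : ((1:Int).toNat : Int) < 1 := hval (1:Int).toNat (by rw [hds]; exact List.mem_cons_self)
        simp at h1
    · have hN : 2 ≤ N := by omega
      rcases lt_trichotomy A 0 with hA | hA | hA
      · -- A < 0 : B returns false; show A's loop also rejects (outside D_f)
        rw [f_alt_nonpos hN (by omega), f_char_neg (by omega) hA, decide_eq_false_iff_not]
        rintro ⟨heq, hval⟩
        by_cases h10 : 10 ≤ N
        · refine hnd ⟨h10, hA, ?_⟩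
          rw [digits10_eq, pymod_eq_emod _ _ (pow_nonneg (by omega) _)]
          exact heq
        · have hds := digits_small (show (1:Int) ≤ N by omega) (show N ≤ 9 by omega)
          have hsm : ((N.toNat : Nat) : Int) < N :=
            hval N.toNat (by rw [hds]; exact List.mem_cons_self)
          omega
      · -- A = 0 : both false
        subst hA
        rw [f_alt_nonpos hN le_rfl, f_char_nonneg (by omega) le_rfl,
          decide_eq_false_iff_not]
        rintro ⟨heq, hval⟩
        obtain ⟨-, hlast, hnil⟩ := digits_facts (show (1:Int) ≤ N by omega)
        have := vLSB_pos (show (1:Int) ≤ N by omega) _ hlast hnil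
        omega
      · -- A ≥ 1 : both sides equal the same decide
        rw [f_char_nonneg (by omega) (by omega), f_alt_char hN (by omega)]

theorem f_changed : Claim_changed_f := by
  unfold Claim_changed_f; decide

theorem f_tight : Claim_exact_f := by
  intro N A _ _ hD
  obtain ⟨h10, hA, hcong⟩ := hD
  rw [digits10_eq] at hcong
  have hN : (1:Int) ≤ N := by omega
  obtain ⟨h10d, _, _⟩ := digits_facts hN
  rw [f_char_neg hN hA, f_alt_nonpos (by omega) (by omega)]
  rw [pymod_eq_emod _ _ (pow_nonneg (by omega) _)] at hcong
  intro hfalse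
  rw [decide_eq_false_iff_not] at hfalse
  exact hfalse ⟨hcong, fun x hx => by
    have hx10 : (x : Int) < 10 := by exact_mod_cast h10d x hx
    omega⟩
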